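-- pv_equiv track=rewrite | github.com/Ssemaganda-George/HealthMama_ai | app/services/openai_service.py | _enhance_luganda_response
-- ===== SOURCE A (Python) =====
-- def _enhance_luganda_response(raw_response: str, model: str, user_message: str) -> str:
--     """Keep Luganda response simple and natural"""
--     # Only replace the most obvious English words that might slip through
--     simple_replacements = {
--         'diabetes': 'ssukali',
--         'doctor': 'musawo',
--         'hospital': 'ddwaliro',
--         'medicine': 'ddagala',
--         'pregnancy': 'lubuto',
--         'baby': 'mwana',
--         'food': 'mmere',
--         'water': 'mazzi'
--     }
--
--     enhanced_response = raw_response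
--     for english, luganda in simple_replacements.items():
--         enhanced_response = enhanced_response.replace(english, luganda)
--
--     # Only add greeting if completely missing
--     if not any(greeting in enhanced_response.lower() for greeting in ['webale', 'oli']):
--         enhanced_response = "Webale. " + enhanced_response
--
--     # Simple, natural closing
--     if not enhanced_response.endswith(('.', '!', '?')):
--         enhanced_response += "."
--
--     # Don't add complicated closings - keep it simple
--     return enhanced_response
-- ===== SOURCE B (Python) =====
-- def _enhance_luganda_response(raw_response: str, model: str, user_message: str) -> str:
--     """Keep Luganda response simple and natural (single left-to-right multi-pattern scan)."""
--     pairs = [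
--         ('diabetes', 'ssukali'),
--         ('doctor', 'musawo'),
--         ('hospital', 'ddwaliro'),
--         ('medicine', 'ddagala'),
--         ('pregnancy', 'lubuto'),
--         ('baby', 'mwana'),
--         ('food', 'mmere'),
--         ('water', 'mazzi'),
--     ]
--
--     out = []
--     i = 0
--     n = len(raw_response)
--     while i < n:
--         for english, luganda in pairs:
--             if raw_response.startswith(english, i):
--                 out.append(luganda)
--                 i += len(english)
--                 break
--         else:
--             out.append(raw_response[i])
--             i += 1
--     enhanced_response = ''.join(out)
--
--     if not any(greeting in enhanced_response.lower() for greeting in ['webale', 'oli']):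
--         enhanced_response = "Webale. " + enhanced_response
--
--     if not enhanced_response.endswith(('.', '!', '?')):
--         enhanced_response += "."
--
--     return enhanced_response
-- ===== Notes on version B (the rewrite author's own statement) =====
-- stated objective: alternative
-- what changed: The eight sequential global str.replace passes are replaced by a single left-to-right scan that at each position emits the Luganda word of the first matching key (the keys are mutually non-prefix, so at most one matches) and never rescans emitted text, with the greeting and closing checks kept as-is; Pre_ excludes inputs containing 'foodiabetes', 'foodoctor', 'foohospital' or 'foomedicine', where two replacements overlap and which word wins is an accidental artefact of A's pass order versus B's leftmost-match rule.
-- outside the precondition, e.g. on _enhance_luganda_response('foohospital', '', ''): A returns 'Webale. mmeredwaliro.', B returns 'Webale. fooddwaliro.'; on _enhance_luganda_response('foodiabetes', '', ''): A returns 'Webale. foossukali.', B returns 'Webale. mmereiabetes.'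
import Mathlib
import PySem

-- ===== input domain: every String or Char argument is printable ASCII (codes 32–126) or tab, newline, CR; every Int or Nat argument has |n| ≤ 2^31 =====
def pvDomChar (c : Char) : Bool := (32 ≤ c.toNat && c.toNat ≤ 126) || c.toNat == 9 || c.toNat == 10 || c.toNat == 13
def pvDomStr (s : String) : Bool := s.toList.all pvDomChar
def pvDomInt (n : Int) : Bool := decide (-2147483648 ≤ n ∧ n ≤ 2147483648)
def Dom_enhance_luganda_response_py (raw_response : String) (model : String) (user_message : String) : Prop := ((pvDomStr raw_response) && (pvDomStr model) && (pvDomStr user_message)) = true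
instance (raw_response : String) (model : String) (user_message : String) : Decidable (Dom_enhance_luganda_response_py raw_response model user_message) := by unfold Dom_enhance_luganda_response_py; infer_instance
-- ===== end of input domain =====

set_option maxRecDepth 16384
set_option maxHeartbeats 1600000

-- B replaces A's eight sequential global str.replace passes by a single left-to-right scan that
-- emits the Luganda word for the first key matching at the current position and never rescans
-- emitted text; greeting and closing checks are unchanged (objective: alternative).

-- ===== PORT A =====
def enhance_luganda_response_py (raw_response : String) (model : String) (user_message : String) : String :=
  -- simple_replacements = {...}  (dict literal, insertion order)
  let simple_replacements : PySem.Dict String String :=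
    PySem.Dict.ofList [("diabetes", "ssukali"), ("doctor", "musawo"), ("hospital", "ddwaliro"),
      ("medicine", "ddagala"), ("pregnancy", "lubuto"), ("baby", "mwana"), ("food", "mmere"),
      ("water", "mazzi")]
  -- for english, luganda in simple_replacements.items(): enhanced_response = enhanced_response.replace(english, luganda)
  let enhanced_response :=
    simple_replacements.items.foldl (fun acc p => PySem.Str.replace acc p.1 p.2) raw_response
  -- if not any(greeting in enhanced_response.lower() for greeting in ['webale', 'oli']):
  let enhanced_response :=
    if ["webale", "oli"].any (fun greeting => PySem.Str.isIn greeting (PySem.Str.lower enhanced_response)) then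
      enhanced_response
    else "Webale. " ++ enhanced_response
  -- if not enhanced_response.endswith(('.', '!', '?')): enhanced_response += "."
  if PySem.Str.endswith enhanced_response "." || PySem.Str.endswith enhanced_response "!" ||
      PySem.Str.endswith enhanced_response "?" then enhanced_response
  else enhanced_response ++ "."

-- ===== PORT B =====
-- the pairs list of Source B, at the character level
def altPairs : List (List Char × List Char) :=
  [("diabetes".toList, "ssukali".toList), ("doctor".toList, "musawo".toList),
   ("hospital".toList, "ddwaliro".toList), ("medicine".toList, "ddagala".toList),
   ("pregnancy".toList, "lubuto".toList), ("baby".toList, "mwana".toList),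
   ("food".toList, "mmere".toList), ("water".toList, "mazzi".toList)]

-- Source B's `while i < n` scan: at each position the first pair whose english key starts here
-- (the for/else with startswith → List.find?) emits its luganda word and skips the key,
-- otherwise the character itself is emitted; fuel = remaining length bounds the iterations
def scanGo (ps : List (List Char × List Char)) : Nat → List Char → List Char
  | 0, l => l
  | _ + 1, [] => []
  | f + 1, c :: t =>
    match ps.find? (fun p => p.1.isPrefixOf (c :: t)) with
    | some p => p.2 ++ scanGo ps f ((c :: t).drop p.1.length)
    | none => c :: scanGo ps f t

def scanW (ps : List (List Char × List Char)) (l : List Char) : List Char := scanGo ps l.length l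

def enhance_luganda_response_py_alt (raw_response : String) (model : String) (user_message : String) : String :=
  -- ''.join(out) of the single scan
  let enhanced_response := String.ofList (scanW altPairs raw_response.toList)
  -- if not any(greeting in enhanced_response.lower() for greeting in ['webale', 'oli']):
  let enhanced_response :=
    if ["webale", "oli"].any (fun greeting => PySem.Str.isIn greeting (PySem.Str.lower enhanced_response)) then
      enhanced_response
    else "Webale. " ++ enhanced_response
  -- if not enhanced_response.endswith(('.', '!', '?')): enhanced_response += "."
  if PySem.Str.endswith enhanced_response "." || PySem.Str.endswith enhanced_response "!" ||
      PySem.Str.endswith enhanced_response "?" then enhanced_response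
  else enhanced_response ++ "."

-- ===== PRECONDITION & SPEC =====
-- Pre_ excludes inputs whose raw_response contains 'foodiabetes', 'foodoctor', 'foohospital' or
-- 'foomedicine': there two replacement words overlap (or a later 'food' pass of A re-matches into an
-- already-inserted Luganda word), and which word wins is an accidental artefact of A's pass order
-- versus B's leftmost-match rule — a corner no one would specify either way.
def Pre_enhance_luganda_response_py (raw_response : String) (model : String) (user_message : String) : Prop :=
  PySem.Str.isIn "foodiabetes" raw_response = false ∧ PySem.Str.isIn "foodoctor" raw_response = false ∧
  PySem.Str.isIn "foohospital" raw_response = false ∧ PySem.Str.isIn "foomedicine" raw_response = false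
instance (raw_response : String) (model : String) (user_message : String) : Decidable (Pre_enhance_luganda_response_py raw_response model user_message) := by unfold Pre_enhance_luganda_response_py; infer_instance

def pvWitness_enhance_luganda_response_py : String × String × String := ("I have diabetes, see a doctor", "", "")

def Spec_enhance_luganda_response_py (raw_response : String) (model : String) (user_message : String) (out : String) : Prop := out = enhance_luganda_response_py_alt raw_response model user_message
instance (raw_response : String) (model : String) (user_message : String) (out : String) : Decidable (Spec_enhance_luganda_response_py raw_response model user_message out) := by unfold Spec_enhance_luganda_response_py; infer_instance

-- ===== CLAIM (what is proved, stated in full; the proofs are below) =====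
def Claim_equal_enhance_luganda_response_py : Prop := ∀ (raw_response : String) (model : String) (user_message : String), Dom_enhance_luganda_response_py raw_response model user_message → Pre_enhance_luganda_response_py raw_response model user_message → Spec_enhance_luganda_response_py raw_response model user_message (enhance_luganda_response_py raw_response model user_message)

-- ===== LEMMAS AND PROOFS =====

-- the four overlap patterns, at the character level
def pvPats : List (List Char) :=
  ["foodiabetes".toList, "foodoctor".toList, "foohospital".toList, "foomedicine".toList]

def NoPat (l : List Char) : Prop := ∀ q ∈ pvPats, ¬ q <:+: l

-- side conditions on a prefix `prev` of the pair list and the next key `kj`: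
-- whenever a key or replacement of `prev` can start strictly inside `kj`'s span, the
-- resulting overlap word is one of the four excluded patterns
def C12 (prev : List (List Char × List Char)) (kj : List Char) : Prop :=
  ∀ v ∈ kj.tails, v ≠ [] → v ≠ kj → ∀ p ∈ prev,
    ((p.1.isPrefixOf v = true ∨ v.isPrefixOf p.1 = true) → (kj.take (kj.length - v.length) ++ p.1) ∈ pvPats) ∧
    ((v.isPrefixOf p.2 = true ∨ p.2.isPrefixOf v = true) → (kj.take (kj.length - v.length) ++ p.1) ∈ pvPats)

-- no suffix of an already-inserted replacement of `prev` can start an occurrence of `kj`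
def C3 (prev : List (List Char × List Char)) (kj : List Char) : Prop :=
  ∀ p ∈ prev, ∀ s ∈ p.2.tails, s ≠ [] → kj.isPrefixOf s = false ∧ s.isPrefixOf kj = false

def CondChain : List (List Char × List Char) → List (List Char × List Char) → Prop
  | _, [] => True
  | prev, p :: rest => p.1 ≠ [] ∧ C12 prev p.1 ∧ C3 prev p.1 ∧ CondChain (prev ++ [p]) rest

theorem prefix_append_cases {k a b : List Char} (h : k <+: a ++ b) : k <+: a ∨ a <+: k := by
  by_cases hle : k.length ≤ a.length
  · exact Or.inl (List.prefix_of_prefix_length_le h (List.prefix_append a b) hle)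
  · exact Or.inr (List.prefix_of_prefix_length_le (List.prefix_append a b) h (by omega))

-- ---- lemmas about PySem.Chars.replace ----

theorem go_acc (old new : List Char) : ∀ (f : Nat) (l acc : List Char),
    PySem.Chars.replace.go old new f l acc = acc.reverse ++ PySem.Chars.replace.go old new f l [] := by
  intro f
  induction f with
  | zero => intro l acc; rfl
  | succ f ih =>
    intro l acc
    cases l with
    | nil => simp [show ∀ a : List Char, PySem.Chars.replace.go old new (f+1) [] a = a.reverse from fun _ => rfl]
    | cons c t =>
      rw [show ∀ a : List Char, PySem.Chars.replace.go old new (f+1) (c::t) a =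
          (if old.isPrefixOf (c::t) then PySem.Chars.replace.go old new f ((c::t).drop old.length) (new.reverse ++ a)
           else PySem.Chars.replace.go old new f t (c :: a)) from fun _ => rfl]
      rw [show PySem.Chars.replace.go old new (f+1) (c::t) [] =
          (if old.isPrefixOf (c::t) then PySem.Chars.replace.go old new f ((c::t).drop old.length) (new.reverse ++ [])
           else PySem.Chars.replace.go old new f t (c :: [])) from rfl]
      split
      · rw [ih _ (new.reverse ++ acc), ih _ (new.reverse ++ [])]; simp
      · rw [ih t (c :: acc), ih t [c]]; simp

theorem go_nil (old new : List Char) (f : Nat) : PySem.Chars.replace.go old new f [] [] = [] := by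
  cases f <;> rfl

theorem go_fuel (old new : List Char) (hold : old ≠ []) : ∀ (f1 : Nat) (f2 : Nat) (l : List Char),
    l.length ≤ f1 → l.length ≤ f2 →
    PySem.Chars.replace.go old new f1 l [] = PySem.Chars.replace.go old new f2 l [] := by
  intro f1
  induction f1 with
  | zero =>
    intro f2 l h1 _
    have : l = [] := by cases l <;> simp_all
    subst this; rw [go_nil, go_nil]
  | succ f1 ih =>
    intro f2 l h1 h2
    cases l with
    | nil => rw [go_nil, go_nil]
    | cons c t =>
      obtain ⟨g, rfl⟩ : ∃ g, f2 = g + 1 := by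
        cases f2 with
        | zero => simp at h2
        | succ g => exact ⟨g, rfl⟩
      rw [show PySem.Chars.replace.go old new (f1+1) (c::t) [] =
          (if old.isPrefixOf (c::t) then PySem.Chars.replace.go old new f1 ((c::t).drop old.length) (new.reverse ++ [])
           else PySem.Chars.replace.go old new f1 t (c :: [])) from rfl]
      rw [show PySem.Chars.replace.go old new (g+1) (c::t) [] =
          (if old.isPrefixOf (c::t) then PySem.Chars.replace.go old new g ((c::t).drop old.length) (new.reverse ++ [])
           else PySem.Chars.replace.go old new g t (c :: [])) from rfl]
      have hol : 1 ≤ old.length := by cases old <;> simp_all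
      split
      · rw [go_acc old new f1 _ (new.reverse ++ []), go_acc old new g _ (new.reverse ++ []),
          ih g _ (by simp at h1 ⊢; omega) (by simp at h2 ⊢; omega)]
      · rw [go_acc old new f1 t [c], go_acc old new g t [c],
          ih g t (by simp at h1; omega) (by simp at h2; omega)]

theorem replace_nil (k r : List Char) (hk : k ≠ []) : PySem.Chars.replace [] k r = [] := by
  rw [PySem.Chars.replace, if_neg (by simpa [List.isEmpty_iff] using hk)]
  rfl

theorem replace_cons_neg (k r : List Char) (hk : k ≠ []) (c : Char) (t : List Char)
    (h : k.isPrefixOf (c :: t) = false) :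
    PySem.Chars.replace (c :: t) k r = c :: PySem.Chars.replace t k r := by
  rw [PySem.Chars.replace, if_neg (by simpa [List.isEmpty_iff] using hk)]
  rw [PySem.Chars.replace, if_neg (by simpa [List.isEmpty_iff] using hk)]
  rw [show PySem.Chars.replace.go k r (c::t).length (c::t) [] =
      (if k.isPrefixOf (c::t) then PySem.Chars.replace.go k r t.length ((c::t).drop k.length) (r.reverse ++ [])
       else PySem.Chars.replace.go k r t.length t (c :: [])) from rfl]
  rw [h]
  simp only [Bool.false_eq_true, if_false]
  rw [go_acc k r t.length t [c]]
  simp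

theorem replace_match (k r l : List Char) (hk : k ≠ []) (h : k.isPrefixOf l = true) :
    PySem.Chars.replace l k r = r ++ PySem.Chars.replace (l.drop k.length) k r := by
  cases l with
  | nil =>
    exfalso
    cases k with
    | nil => exact hk rfl
    | cons a b => simp [List.isPrefixOf] at h
  | cons c t =>
    rw [PySem.Chars.replace, if_neg (by simpa [List.isEmpty_iff] using hk)]
    rw [PySem.Chars.replace, if_neg (by simpa [List.isEmpty_iff] using hk)]
    rw [show PySem.Chars.replace.go k r (c::t).length (c::t) [] =
        (if k.isPrefixOf (c::t) then PySem.Chars.replace.go k r t.length ((c::t).drop k.length) (r.reverse ++ [])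
         else PySem.Chars.replace.go k r t.length t (c :: [])) from rfl]
    rw [h]
    simp only [if_true]
    rw [go_acc k r t.length _ (r.reverse ++ [])]
    have hol : 1 ≤ k.length := by cases k <;> simp_all
    rw [go_fuel k r hk t.length ((c::t).drop k.length).length ((c::t).drop k.length)
      (by simp [List.length_drop]; omega) (le_refl _)]
    simp

theorem replace_append_nomatch (k r : List Char) (hk : k ≠ []) :
    ∀ (u v : List Char), (∀ s ∈ u.tails, s ≠ [] → k.isPrefixOf (s ++ v) = false) →
    PySem.Chars.replace (u ++ v) k r = u ++ PySem.Chars.replace v k r := by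
  intro u
  induction u with
  | nil => intro v _; simp
  | cons a u' ih =>
    intro v hcond
    have h1 : k.isPrefixOf ((a :: u') ++ v) = false := by
      have := hcond (a :: u') ((List.mem_tails _ _).mpr (List.suffix_refl _)) (by simp)
      simpa using this
    rw [show (a :: u') ++ v = a :: (u' ++ v) from rfl]
    rw [replace_cons_neg k r hk a (u' ++ v) (by simpa using h1)]
    rw [ih v (fun s hs hsne => hcond s (by
      rw [List.tails_cons]; exact List.mem_cons_of_mem _ hs) hsne)]
    rfl

-- ---- lemmas about the scanner ----

theorem scanGo_fuel (ps : List (List Char × List Char)) (hne : ∀ p ∈ ps, p.1 ≠ []) :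
    ∀ (f1 f2 : Nat) (l : List Char), l.length ≤ f1 → l.length ≤ f2 →
    scanGo ps f1 l = scanGo ps f2 l := by
  intro f1
  induction f1 with
  | zero =>
    intro f2 l h1 _
    have : l = [] := by cases l <;> simp_all
    subst this
    cases f2 <;> rfl
  | succ f1 ih =>
    intro f2 l h1 h2
    cases l with
    | nil => cases f2 <;> rfl
    | cons c t =>
      obtain ⟨g, rfl⟩ : ∃ g, f2 = g + 1 := by
        cases f2 with
        | zero => simp at h2
        | succ g => exact ⟨g, rfl⟩
      simp only [scanGo]
      cases hf : ps.find? (fun p => p.1.isPrefixOf (c :: t)) with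
      | some p =>
        have hm := List.mem_of_find?_eq_some hf
        have hol : 1 ≤ p.1.length := by
          have := hne p hm; cases hp : p.1 with
          | nil => exact absurd hp this
          | cons x xs => simp
        simp only [hf]
        congr 1
        exact ih g _ (by simp [List.length_drop] at h1 ⊢; omega) (by simp [List.length_drop] at h2 ⊢; omega)
      | none =>
        simp only [hf]
        congr 1
        exact ih g t (by simp at h1; omega) (by simp at h2; omega)

theorem scanW_nil (ps : List (List Char × List Char)) : scanW ps [] = [] := rfl

theorem scanW_cons_some (ps : List (List Char × List Char)) (hne : ∀ p ∈ ps, p.1 ≠ [])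
    (c : Char) (t : List Char) (p : List Char × List Char)
    (h : ps.find? (fun p => p.1.isPrefixOf (c :: t)) = some p) :
    scanW ps (c :: t) = p.2 ++ scanW ps ((c :: t).drop p.1.length) := by
  have hm := List.mem_of_find?_eq_some h
  have hol : 1 ≤ p.1.length := by
    have := hne p hm; cases hp : p.1 with
    | nil => exact absurd hp this
    | cons x xs => simp
  show scanGo ps (t.length + 1) (c :: t) = _
  simp only [scanGo, h]
  congr 1
  exact scanGo_fuel ps hne t.length _ _ (by simp [List.length_drop]; omega) (le_refl _)

theorem scanW_cons_none (ps : List (List Char × List Char))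
    (c : Char) (t : List Char)
    (h : ps.find? (fun p => p.1.isPrefixOf (c :: t)) = none) :
    scanW ps (c :: t) = c :: scanW ps t := by
  show scanGo ps (t.length + 1) (c :: t) = _
  simp only [scanGo, h]
  rfl

theorem scanW_nil_ps (l : List Char) : scanW [] l = l := by
  induction l with
  | nil => rfl
  | cons c t ih => rw [scanW_cons_none [] c t rfl, ih]

theorem take_of_append (u v : List Char) : (u ++ v).take ((u ++ v).length - v.length) = u := by
  simp

theorem NoPat.mono {l l' : List Char} (h : NoPat l) (hinf : l' <:+: l) : NoPat l' :=
  fun q hq hql => h q hq (hql.trans hinf)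

theorem ne_of_append_left {u v : List Char} (hu : u ≠ []) : v ≠ u ++ v := by
  intro h
  have := congrArg List.length h
  simp at this
  exact hu this

-- if a nonempty proper suffix v of kj (kj = u ++ v, u nonempty) is a prefix of the scanner's
-- output on t, then — patterns being excluded from u ++ t — it is a prefix of t itself
theorem scan_prefix_pull (prev : List (List Char × List Char)) (kj : List Char)
    (hne : ∀ p ∈ prev, p.1 ≠ []) (hc : C12 prev kj) :
    ∀ (n : Nat) (t u v : List Char), t.length = n → kj = u ++ v → u ≠ [] → v ≠ [] →
      NoPat (u ++ t) → v.isPrefixOf (scanW prev t) = true → v.isPrefixOf t = true := by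
  intro n
  induction n using Nat.strong_induction_on with
  | _ n IH =>
    intro t u v hn hkj hu hv hnp hpre
    cases t with
    | nil =>
      rw [scanW_nil] at hpre
      exact absurd (List.prefix_nil.mp (List.isPrefixOf_iff_prefix.mp hpre)) hv
    | cons c t' =>
      cases hf : prev.find? (fun p => p.1.isPrefixOf (c :: t')) with
      | some p =>
        exfalso
        have hm := List.mem_of_find?_eq_some hf
        have hp1 : p.1.isPrefixOf (c :: t') = true := by
          have := List.find?_some hf; simpa using this
        rw [scanW_cons_some prev hne c t' p hf] at hpre
        have hsplit := prefix_append_cases (List.isPrefixOf_iff_prefix.mp hpre)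
        have hvt : v ∈ kj.tails := (List.mem_tails _ _).mpr ⟨u, hkj.symm⟩
        have hvne : v ≠ kj := by rw [hkj]; exact ne_of_append_left hu
        have hc2 := (hc v hvt hv hvne p hm).2
        have htake : kj.take (kj.length - v.length) = u := by rw [hkj]; exact take_of_append u v
        rw [htake] at hc2
        have hpat : (u ++ p.1) ∈ pvPats := by
          apply hc2
          rcases hsplit with h | h
          · exact Or.inl (List.isPrefixOf_iff_prefix.mpr h)
          · exact Or.inr (List.isPrefixOf_iff_prefix.mpr h)
        apply hnp (u ++ p.1) hpat
        obtain ⟨w, hw⟩ := List.isPrefixOf_iff_prefix.mp hp1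
        exact List.IsPrefix.isInfix ⟨w, by rw [List.append_assoc, hw]⟩
      | none =>
        rw [scanW_cons_none prev c t' hf] at hpre
        cases v with
        | nil => exact absurd rfl hv
        | cons v0 v1 =>
          have hsplit : (v0 == c) = true ∧ v1.isPrefixOf (scanW prev t') = true := by
            simpa [List.isPrefixOf] using hpre
          have hv0 : v0 = c := by simpa using hsplit.1
          by_cases hv1 : v1 = []
          · subst hv1; subst hv0
            simp [List.isPrefixOf]
          · have hrec := IH t'.length (by simp [← hn]) t' (u ++ [v0]) v1 rfl
              (by rw [hkj]; simp) (by simp) hv1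
              (by simpa [hv0, List.append_assoc] using hnp)
              hsplit.2
            subst hv0
            simp [List.isPrefixOf, hrec]

-- the scanner copies a literal chunk v (a suffix-part of kj) verbatim when no pattern is around
theorem scan_pull_lit (prev : List (List Char × List Char)) (kj : List Char)
    (hne : ∀ p ∈ prev, p.1 ≠ []) (hc : C12 prev kj) :
    ∀ (v u t : List Char), kj = u ++ v → NoPat (u ++ (v ++ t)) →
      (u = [] → prev.find? (fun p => p.1.isPrefixOf (v ++ t)) = none) →
      scanW prev (v ++ t) = v ++ scanW prev t := by
  intro v
  induction v with
  | nil => intro u t _ _ _; simp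
  | cons a v' ih =>
    intro u t hkj hnp h0
    have hnone : prev.find? (fun p => p.1.isPrefixOf ((a :: v') ++ t)) = none := by
      by_cases hu0 : u = []
      · exact h0 hu0
      · cases hf : prev.find? (fun p => p.1.isPrefixOf ((a :: v') ++ t)) with
        | none => rfl
        | some p =>
          exfalso
          have hm := List.mem_of_find?_eq_some hf
          have hp1 : p.1.isPrefixOf ((a :: v') ++ t) = true := by
            have := List.find?_some hf; simpa using this
          have hsplit := prefix_append_cases (List.isPrefixOf_iff_prefix.mp hp1)
          have hvt : (a :: v') ∈ kj.tails := (List.mem_tails _ _).mpr ⟨u, hkj.symm⟩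
          have hvne : (a :: v') ≠ kj := by rw [hkj]; exact ne_of_append_left hu0
          have hc1 := (hc (a :: v') hvt (by simp) hvne p hm).1
          have htake : kj.take (kj.length - (a :: v').length) = u := by
            rw [hkj]; exact take_of_append u (a :: v')
          rw [htake] at hc1
          have hpat : (u ++ p.1) ∈ pvPats := by
            apply hc1
            rcases hsplit with h | h
            · exact Or.inl (List.isPrefixOf_iff_prefix.mpr h)
            · exact Or.inr (List.isPrefixOf_iff_prefix.mpr h)
          apply hnp (u ++ p.1) hpat
          obtain ⟨w, hw⟩ := List.isPrefixOf_iff_prefix.mp hp1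
          exact List.IsPrefix.isInfix ⟨w, by rw [List.append_assoc, hw]⟩
    rw [show (a :: v') ++ t = a :: (v' ++ t) from rfl]
    rw [scanW_cons_none prev a (v' ++ t) (by simpa using hnone)]
    rw [ih (u ++ [a]) t (by rw [hkj]; simp)
      (by
        have : u ++ [a] ++ (v' ++ t) = u ++ ((a :: v') ++ t) := by simp
        rw [this]; exact hnp)
      (by intro h; exact absurd h (by simp))]
    simp

-- one more global replace pass equals one more key given to the scanner
theorem step_lemma (prev : List (List Char × List Char)) (kj rj : List Char)
    (hne : ∀ p ∈ prev, p.1 ≠ []) (hk : kj ≠ []) (hc12 : C12 prev kj) (hc3 : C3 prev kj) :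
    ∀ (n : Nat) (l : List Char), l.length = n → NoPat l →
      PySem.Chars.replace (scanW prev l) kj rj = scanW (prev ++ [(kj, rj)]) l := by
  have hneB : ∀ p ∈ prev ++ [(kj, rj)], p.1 ≠ [] := by
    intro p hp
    rcases List.mem_append.mp hp with h | h
    · exact hne p h
    · simp at h; subst h; exact hk
  intro n
  induction n using Nat.strong_induction_on with
  | _ n IH =>
    intro l hn hnp
    cases l with
    | nil => rw [scanW_nil, scanW_nil, replace_nil kj rj hk]
    | cons c t =>
      cases hf : prev.find? (fun p => p.1.isPrefixOf (c :: t)) with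
      | some p =>
        have hm := List.mem_of_find?_eq_some hf
        have hfB : (prev ++ [(kj, rj)]).find? (fun p => p.1.isPrefixOf (c :: t)) = some p := by
          rw [List.find?_append, hf]; rfl
        rw [scanW_cons_some prev hne c t p hf, scanW_cons_some _ hneB c t p hfB]
        have hol : 1 ≤ p.1.length := by
          have := hne p hm; cases hp : p.1 with
          | nil => exact absurd hp this
          | cons x xs => simp [hp]
        rw [replace_append_nomatch kj rj hk p.2 _ (by
          intro s hs hsne
          cases hcon : kj.isPrefixOf (s ++ scanW prev ((c :: t).drop p.1.length)) with
          | false => rfl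
          | true =>
            exfalso
            have hsplit := prefix_append_cases (List.isPrefixOf_iff_prefix.mp hcon)
            have h3 := hc3 p hm s hs hsne
            rcases hsplit with h | h
            · rw [List.isPrefixOf_iff_prefix.mpr h] at h3; simp at h3
            · rw [List.isPrefixOf_iff_prefix.mpr h] at h3; simp at h3)]
        congr 1
        exact IH ((c :: t).drop p.1.length).length
          (by simp [List.length_drop, ← hn]; omega) _ rfl
          (hnp.mono (List.drop_suffix _ _).isInfix)
      | none =>
        cases hpre : kj.isPrefixOf (c :: t) with
        | true =>
          have hfB : (prev ++ [(kj, rj)]).find? (fun p => p.1.isPrefixOf (c :: t)) = some (kj, rj) := by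
            rw [List.find?_append, hf]
            simp [List.find?, hpre]
          obtain ⟨rest, hrest⟩ := List.isPrefixOf_iff_prefix.mp hpre
          have hsc : scanW prev (c :: t) = kj ++ scanW prev rest := by
            rw [← hrest]
            exact scan_pull_lit prev kj hne hc12 kj [] rest (by simp)
              (by rw [List.nil_append, hrest]; exact hnp)
              (fun _ => by rw [hrest]; exact hf)
          rw [hsc]
          rw [replace_match kj rj _ hk (List.isPrefixOf_iff_prefix.mpr (List.prefix_append _ _))]
          rw [List.drop_left]
          rw [scanW_cons_some _ hneB c t (kj, rj) hfB]
          have hdrop : (c :: t).drop kj.length = rest := by rw [← hrest]; exact List.drop_left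
          rw [hdrop]
          congr 1
          have hol : 1 ≤ kj.length := by
            cases hkk : kj with
            | nil => exact absurd hkk hk
            | cons x xs => simp
          have hlen : rest.length < n := by
            have hll := congrArg List.length hrest
            simp at hll hn
            omega
          exact IH rest.length hlen rest rfl (hnp.mono (List.IsSuffix.isInfix ⟨kj, hrest⟩))
        | false =>
          have hfB : (prev ++ [(kj, rj)]).find? (fun p => p.1.isPrefixOf (c :: t)) = none := by
            rw [List.find?_append, hf]
            simp [List.find?, hpre]
          rw [scanW_cons_none prev c t hf, scanW_cons_none _ c t hfB]
          have hnopref : kj.isPrefixOf (c :: scanW prev t) = false := by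
            cases hcon : kj.isPrefixOf (c :: scanW prev t) with
            | false => rfl
            | true =>
              exfalso
              cases hkk : kj with
              | nil => exact hk hkk
              | cons k0 k1 =>
                rw [hkk] at hcon
                have hsplit : (k0 == c) = true ∧ k1.isPrefixOf (scanW prev t) = true := by
                  simpa [List.isPrefixOf] using hcon
                have hk0 : k0 = c := by simpa using hsplit.1
                by_cases hk1 : k1 = []
                · subst hk1; subst hk0
                  rw [hkk] at hpre
                  simp [List.isPrefixOf] at hpre
                · have hrec := scan_prefix_pull prev kj hne hc12 t.length t [k0] k1 rfl
                    (by rw [hkk]; rfl) (by simp) hk1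
                    (by rw [hk0]; exact hnp)
                    hsplit.2
                  rw [hkk] at hpre
                  simp [List.isPrefixOf, hk0, hrec] at hpre
          rw [replace_cons_neg kj rj hk c _ hnopref]
          congr 1
          exact IH t.length (by simp [← hn]) t rfl (hnp.mono (List.suffix_cons c t).isInfix)

theorem fold_eq_scan : ∀ (suf prev : List (List Char × List Char)) (l : List Char),
    CondChain prev suf → (∀ p ∈ prev, p.1 ≠ []) → NoPat l →
    suf.foldl (fun acc p => PySem.Chars.replace acc p.1 p.2) (scanW prev l) = scanW (prev ++ suf) l := by
  intro suf
  induction suf with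
  | nil => intro prev l _ _ _; simp
  | cons p suf' ih =>
    intro prev l hcc hne hnp
    obtain ⟨h1, h2, h3, h4⟩ := hcc
    simp only [List.foldl_cons]
    rw [step_lemma prev p.1 p.2 hne h1 h2 h3 l.length l rfl hnp]
    have hne' : ∀ q ∈ prev ++ [(p.1, p.2)], q.1 ≠ [] := by
      intro q hq
      rcases List.mem_append.mp hq with h | h
      · exact hne q h
      · simp at h; subst h; exact h1
    have := ih (prev ++ [(p.1, p.2)]) l (by simpa using h4) hne' hnp
    rw [this]
    simp

theorem condchain_altPairs : CondChain [] altPairs := by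
  unfold altPairs
  simp only [CondChain]
  repeat' apply And.intro
  all_goals first
    | trivial
    | decide
    | (unfold C12; decide)
    | (unfold C3; decide)

theorem fold_toList : ∀ (ps : List (String × String)) (s : String),
    (ps.foldl (fun acc p => PySem.Str.replace acc p.1 p.2) s).toList =
    (ps.map (fun p => (p.1.toList, p.2.toList))).foldl (fun acc p => PySem.Chars.replace acc p.1 p.2) s.toList := by
  intro ps
  induction ps with
  | nil => intro s; rfl
  | cons p ps' ih =>
    intro s
    simp only [List.foldl_cons, List.map_cons]
    rw [ih (PySem.Str.replace s p.1 p.2)]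
    congr 1
    exact PySem.Str.toList_replace s p.1 p.2

theorem enhance_luganda_response_py_spec : Claim_equal_enhance_luganda_response_py := by
  intro r m u hdom hnd
  unfold Pre_enhance_luganda_response_py at hnd
  show Spec_enhance_luganda_response_py r m u (enhance_luganda_response_py r m u)
  unfold Spec_enhance_luganda_response_py
  have hnp : NoPat r.toList := by
    intro q hq
    fin_cases hq <;> simp only [← PySem.Str.isIn_iff_infix] <;> simp_all
  have hitems : (PySem.Dict.ofList [("diabetes", "ssukali"), ("doctor", "musawo"), ("hospital", "ddwaliro"),
      ("medicine", "ddagala"), ("pregnancy", "lubuto"), ("baby", "mwana"), ("food", "mmere"),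
      ("water", "mazzi")] : PySem.Dict String String).items =
      [("diabetes", "ssukali"), ("doctor", "musawo"), ("hospital", "ddwaliro"),
       ("medicine", "ddagala"), ("pregnancy", "lubuto"), ("baby", "mwana"), ("food", "mmere"),
       ("water", "mazzi")] := by decide
  have key : ([("diabetes", "ssukali"), ("doctor", "musawo"), ("hospital", "ddwaliro"),
      ("medicine", "ddagala"), ("pregnancy", "lubuto"), ("baby", "mwana"), ("food", "mmere"),
      ("water", "mazzi")] : List (String × String)).foldl (fun acc p => PySem.Str.replace acc p.1 p.2) r =
      String.ofList (scanW altPairs r.toList) := by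
    have h1 := fold_toList [("diabetes", "ssukali"), ("doctor", "musawo"), ("hospital", "ddwaliro"),
      ("medicine", "ddagala"), ("pregnancy", "lubuto"), ("baby", "mwana"), ("food", "mmere"),
      ("water", "mazzi")] r
    have h2 := fold_eq_scan altPairs [] r.toList condchain_altPairs (by simp) hnp
    rw [scanW_nil_ps] at h2
    have hmap : ([("diabetes", "ssukali"), ("doctor", "musawo"), ("hospital", "ddwaliro"),
      ("medicine", "ddagala"), ("pregnancy", "lubuto"), ("baby", "mwana"), ("food", "mmere"),
      ("water", "mazzi")] : List (String × String)).map (fun p => (p.1.toList, p.2.toList)) = altPairs := by decide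
    rw [hmap, h2] at h1
    exact (String.ofList_toList).symm.trans ((congrArg String.ofList h1).trans rfl)
  show enhance_luganda_response_py r m u = enhance_luganda_response_py_alt r m u
  simp only [enhance_luganda_response_py, enhance_luganda_response_py_alt, hitems, key]
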